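-- pv_equiv track=rewrite | github.com/radhe2205/state-search | part3/assign.py | find_all_groups
-- ===== SOURCE A (Python) =====
-- import copy
--
-- def find_all_groups(userids):
--     final_groups = []
--     if len(userids) == 1:
--         return [[[userids[0]]]]
--     prev_groups = find_all_groups(userids[:len(userids) - 1])
--     for group in prev_groups:
--         for i in range(len(group)):
--             if len(group[i]) > 2:
--                 continue
--             new_group = copy.deepcopy(group)
--             new_group[i].append(userids[len(userids) - 1])
--             final_groups.append(new_group)
--         new_group = copy.deepcopy(group)
--         new_group.append([userids[len(userids) - 1]])
--         final_groups.append(new_group)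
--     return final_groups
-- ===== SOURCE B (Python) =====
-- def find_all_groups(userids):
--     # Iterative build-up: fold each subsequent user into every partition so far,
--     # rebuilding lists instead of deepcopying whole partitions.
--     groups = [[[userids[0]]]]
--     for u in userids[1:]:
--         new = []
--         for part in groups:
--             for j in range(len(part)):
--                 if len(part[j]) <= 2:
--                     new.append([g + [u] if k == j else list(g)
--                                 for k, g in enumerate(part)])
--             new.append([list(g) for g in part] + [[u]])
--         groups = new
--     return groups
-- ===== Notes on version B (the rewrite author's own statement) =====
-- stated objective: simpler
-- what changed: Replaces A's recursion-on-prefix with an iterative left-to-right fold that inserts each user into every partition built so far, rebuilding lists per insertion instead of deepcopying the whole partition twice per placement.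
import Mathlib
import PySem

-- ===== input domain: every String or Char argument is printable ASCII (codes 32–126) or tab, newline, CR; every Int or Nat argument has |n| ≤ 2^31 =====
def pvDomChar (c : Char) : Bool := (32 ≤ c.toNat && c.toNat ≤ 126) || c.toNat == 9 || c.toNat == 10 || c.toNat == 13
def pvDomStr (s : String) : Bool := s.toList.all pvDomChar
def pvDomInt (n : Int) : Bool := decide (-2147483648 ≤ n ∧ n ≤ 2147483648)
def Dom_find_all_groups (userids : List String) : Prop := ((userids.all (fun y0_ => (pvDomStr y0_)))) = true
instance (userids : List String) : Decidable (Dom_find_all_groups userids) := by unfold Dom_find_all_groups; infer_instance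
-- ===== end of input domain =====

-- B replaces A's recursion on the prefix by an iterative fold over the users; same values, no speed claim.
-- On the empty list A raises RecursionError and B raises IndexError, so Pre_ excludes it.

-- ===== PORT A =====
-- A recurses on userids[:len-1]; on [] the Python recurses forever (RecursionError),
-- outside Pre_; the port returns [] there to be total.
def find_all_groups (userids : List String) : List (List (List String)) :=
  if h0 : userids = [] then []
  else if userids.length = 1 then [[[userids.headD ""]]]
  else
    let prev := find_all_groups userids.dropLast
    let last := userids.getLastD ""
    prev.foldl (fun final group =>
      let final := (List.range group.length).foldl (fun acc i =>
          if (group.getD i []).length > 2 then acc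
          else acc ++ [group.set i ((group.getD i []) ++ [last])]) final
      final ++ [group ++ [[last]]]) []
termination_by userids.length
decreasing_by
  have := List.length_pos_of_ne_nil h0
  simp [List.length_dropLast]
  omega

-- ===== PORT B =====
-- B's Python raises IndexError on []; outside Pre_; port returns [] there.
def find_all_groups_alt (userids : List String) : List (List (List String)) :=
  match userids with
  | [] => []
  | u0 :: rest =>
    rest.foldl (fun groups u =>
      groups.foldl (fun new part =>
        let new := (List.range part.length).foldl (fun acc j =>
            if (part.getD j []).length ≤ 2 then
              acc ++ [part.mapIdx (fun k g => if k = j then g ++ [u] else g)]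
            else acc) new
        new ++ [part.map (fun g => g) ++ [[u]]]) []) [[[u0]]]

-- ===== PRECONDITION & SPEC =====
-- Pre_ excludes only the empty list, on which A raises RecursionError (no value).
def Pre_find_all_groups (userids : List String) : Prop := userids ≠ []
instance (userids : List String) : Decidable (Pre_find_all_groups userids) := by unfold Pre_find_all_groups; infer_instance
def pvWitness_find_all_groups : List String := ["a", "b", "c"]

def Spec_find_all_groups (userids : List String) (out : List (List (List String))) : Prop := out = find_all_groups_alt userids
instance (userids : List String) (out : List (List (List String))) : Decidable (Spec_find_all_groups userids out) := by unfold Spec_find_all_groups; infer_instance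

-- ===== CLAIM (what is proved, stated in full; the proofs are below) =====
def Claim_equal_find_all_groups : Prop := ∀ (userids : List String), Dom_find_all_groups userids → Pre_find_all_groups userids → Spec_find_all_groups userids (find_all_groups userids)

-- ===== LEMMAS AND PROOFS =====

-- the per-user step, as A computes it
def stepA (u : String) (prev : List (List (List String))) : List (List (List String)) :=
  prev.foldl (fun final group =>
    let final := (List.range group.length).foldl (fun acc i =>
        if (group.getD i []).length > 2 then acc
        else acc ++ [group.set i ((group.getD i []) ++ [u])]) final
    final ++ [group ++ [[u]]]) []

-- the per-user step, as B computes it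
def stepB (u : String) (groups : List (List (List String))) : List (List (List String)) :=
  groups.foldl (fun new part =>
    let new := (List.range part.length).foldl (fun acc j =>
        if (part.getD j []).length ≤ 2 then
          acc ++ [part.mapIdx (fun k g => if k = j then g ++ [u] else g)]
        else acc) new
    new ++ [part.map (fun g => g) ++ [[u]]]) []

theorem mapIdx_id_aux (gs : List (List String)) : List.mapIdx (fun _ g => g) gs = gs := by
  induction gs with
  | nil => rfl
  | cons g gs ih => simp only [List.mapIdx_cons]; exact congrArg (g :: ·) ih

theorem mapIdx_congr_aux {α β : Type} (f g : Nat → α → β) (l : List α)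
    (h : ∀ i a, f i a = g i a) : l.mapIdx f = l.mapIdx g := by
  induction l generalizing f g with
  | nil => rfl
  | cons a l ih =>
    simp only [List.mapIdx_cons, h 0 a]
    exact congrArg _ (ih _ _ (fun i b => h (i+1) b))

theorem set_eq_mapIdx (part : List (List String)) (j : Nat) (u : String) (h : j < part.length) :
    part.set j ((part.getD j []) ++ [u]) = part.mapIdx (fun k g => if k = j then g ++ [u] else g) := by
  induction part generalizing j with
  | nil => simp at h
  | cons g gs ih =>
    cases j with
    | zero => simp [List.mapIdx_cons, mapIdx_id_aux]
    | succ j =>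
      have hj : j < gs.length := by simpa using h
      simp only [List.set_cons_succ, List.getD_cons_succ, List.mapIdx_cons]
      rw [ih j hj, if_neg (by omega : ¬ (0 = j+1))]
      refine congrArg _ (mapIdx_congr_aux _ _ gs ?_)
      intro i a
      by_cases hij : i = j
      · subst hij; simp
      · rw [if_neg hij, if_neg (by omega)]

theorem inner_eq (part : List (List String)) (u : String) (acc : List (List (List String))) :
    (List.range part.length).foldl (fun acc i =>
        if (part.getD i []).length > 2 then acc
        else acc ++ [part.set i ((part.getD i []) ++ [u])]) acc
    = (List.range part.length).foldl (fun acc j =>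
        if (part.getD j []).length ≤ 2 then
          acc ++ [part.mapIdx (fun k g => if k = j then g ++ [u] else g)]
        else acc) acc := by
  apply PySem.List.foldl_congr_mem
  intro acc i hi
  have hlt : i < part.length := List.mem_range.mp hi
  by_cases h2 : (part.getD i []).length ≤ 2
  · rw [if_neg (by omega), if_pos h2, set_eq_mapIdx part i u hlt]
  · rw [if_pos (by omega), if_neg h2]

theorem step_eq (u : String) (gs : List (List (List String))) : stepA u gs = stepB u gs := by
  unfold stepA stepB
  apply PySem.List.foldl_congr_mem
  intro acc part _
  simp only [List.map_id']
  rw [inner_eq]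

theorem alt_concat (u0 u : String) (rest : List String) :
    find_all_groups_alt (u0 :: (rest ++ [u])) = stepB u (find_all_groups_alt (u0 :: rest)) := by
  simp [find_all_groups_alt, stepB, List.foldl_append]

theorem A_concat (u0 u : String) (rest : List String) :
    find_all_groups (u0 :: (rest ++ [u])) = stepA u (find_all_groups (u0 :: rest)) := by
  rw [find_all_groups]
  have hne : (u0 :: (rest ++ [u])) ≠ [] := by simp
  have hlen : (u0 :: (rest ++ [u])).length ≠ 1 := by simp
  rw [dif_neg hne, if_neg hlen]
  have h1 : (u0 :: (rest ++ [u])).dropLast = u0 :: rest := by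
    rw [show u0 :: (rest ++ [u]) = (u0 :: rest) ++ [u] by simp, List.dropLast_concat]
  have h2 : (u0 :: (rest ++ [u])).getLastD "" = u := by
    rw [List.getLastD_eq_getLast?, show u0 :: (rest ++ [u]) = (u0 :: rest) ++ [u] by simp, List.getLast?_concat]
    rfl
  rw [h1, h2]
  rfl

theorem main_eq (u0 : String) (rest : List String) :
    find_all_groups (u0 :: rest) = find_all_groups_alt (u0 :: rest) := by
  induction rest using List.reverseRecOn with
  | nil => simp [find_all_groups, find_all_groups_alt]
  | append_singleton rs u ih =>
    rw [A_concat, alt_concat, ih, step_eq]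

-- ===== VERDICT (by name: the statement is the Claim_ definition above) =====
theorem find_all_groups_spec : Claim_equal_find_all_groups := by
  intro userids _ hpre
  unfold Spec_find_all_groups
  cases userids with
  | nil => exact absurd rfl hpre
  | cons u0 rest => exact main_eq u0 rest
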